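-- pv_equiv track=rewrite | github.com/canetizen/structural-analysis-on-distributed-systems | structural_analysis.py | build_topic_categories
-- ===== SOURCE A (Python) =====
-- MIN_LCP_LEN = 3
--
-- def longest_common_prefix(str1, str2):
--     """Return longest common prefix of two strings."""
--     idx = 0
--     max_len = min(len(str1), len(str2))
--     while idx < max_len and str1[idx] == str2[idx]:
--         idx += 1
--     return str1[:idx]
--
-- def build_topic_categories(topic_names):
--     """
--     Build topic categories using longest common prefix (LCP).
--
--     Args:
--         topic_names (dict): topic_id -> topic_name
--
--     Returns:
--         dict: topic_id -> category
--     """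
--     categories = {}
--
--     for tid, name in topic_names.items():
--         best_prefix = ""
--         for other_id, other_name in topic_names.items():
--             if tid == other_id:
--                 continue
--             lcp = longest_common_prefix(name, other_name)
--             if len(lcp) >= MIN_LCP_LEN and len(lcp) > len(best_prefix):
--                 best_prefix = lcp
--
--         categories[tid] = best_prefix if best_prefix else name
--
--     return categories
-- ===== SOURCE B (Python) =====
-- MIN_LCP_LEN = 3
--
-- def _lcp_len(a, b):
--     k = 0
--     m = min(len(a), len(b))
--     while k < m and a[k] == b[k]:
--         k += 1
--     return k
--
-- def build_topic_categories(topic_names):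
--     # Sort by name: each topic's longest common prefix with any other topic is
--     # achieved with one of its two neighbours in sorted order.
--     s = sorted(topic_names.items(), key=lambda kv: kv[1])
--     names = [name for _, name in s]
--     best = {}
--     for (tid, name), prev, nxt in zip(s, [""] + names, names[1:] + [""]):
--         l = max(_lcp_len(name, prev), _lcp_len(name, nxt))
--         best[tid] = name[:l] if l >= MIN_LCP_LEN else name
--     return {tid: best[tid] for tid in topic_names}
-- ===== Notes on version B (the rewrite author's own statement) =====
-- stated objective: faster
-- what changed: A compares every topic name against every other name (all pairs); B sorts the entries by name once and takes each topic's best LCP as the maximum of the LCPs with its two sorted neighbours (the longest common prefix with any other name is always attained at a sorted neighbour), then rebuilds the dict in the original key order.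
import Mathlib
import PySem

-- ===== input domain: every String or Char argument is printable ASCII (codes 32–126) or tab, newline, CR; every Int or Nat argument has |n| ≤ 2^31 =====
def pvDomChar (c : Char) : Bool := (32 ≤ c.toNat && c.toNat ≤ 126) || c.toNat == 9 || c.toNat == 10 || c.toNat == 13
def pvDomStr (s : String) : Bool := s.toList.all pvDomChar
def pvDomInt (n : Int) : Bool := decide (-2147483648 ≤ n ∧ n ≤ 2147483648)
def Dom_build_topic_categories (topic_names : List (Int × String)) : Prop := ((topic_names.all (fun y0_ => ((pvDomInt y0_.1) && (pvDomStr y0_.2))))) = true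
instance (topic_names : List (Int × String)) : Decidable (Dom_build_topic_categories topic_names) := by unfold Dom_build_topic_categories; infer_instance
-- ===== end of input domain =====

-- B replaces A's all-pairs LCP scan by sort-and-compare-with-neighbours (the longest
-- common prefix of a name with any other name is attained at a sorted neighbour).

def MIN_LCP_LEN : Nat := 3   -- module constant MIN_LCP_LEN = 3 (compared against string lengths)

-- ===== PORT A =====

-- the 'while idx < max_len and str1[idx] == str2[idx]: idx += 1' loop of longest_common_prefix
def longest_common_prefix_idx : List Char → List Char → Nat
  | c1 :: t1, c2 :: t2 => if c1 = c2 then longest_common_prefix_idx t1 t2 + 1 else 0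
  | _, _ => 0

-- return str1[:idx]  (idx ≥ 0, ≤ len(str1): the slice is List.take; exact)
def longest_common_prefix (str1 str2 : String) : String :=
  String.ofList (str1.toList.take (longest_common_prefix_idx str1.toList str2.toList))

def build_topic_categories (topic_names : List (Int × String)) : List (Int × String) :=
  (topic_names.foldl
    (fun categories p =>
      let best_prefix := topic_names.foldl
        (fun best_prefix q =>
          if p.1 == q.1 then best_prefix
          else
            let lcp := longest_common_prefix p.2 q.2
            if MIN_LCP_LEN ≤ lcp.toList.length ∧ best_prefix.toList.length < lcp.toList.length
            then lcp else best_prefix)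
        ""
      categories.insert p.1 (if best_prefix ≠ "" then best_prefix else p.2))
    (PySem.Dict.empty : PySem.Dict Int String)).items

-- ===== PORT B =====

-- the while loop of _lcp_len (returns only the matched length)
def lcp_len : List Char → List Char → Nat
  | a :: ta, b :: tb => if a = b then lcp_len ta tb + 1 else 0
  | _, _ => 0

def build_topic_categories_alt (topic_names : List (Int × String)) : List (Int × String) :=
  let s := PySem.List.sorted topic_names (fun kv => kv.2)
  let names := s.map (fun kv => kv.2)
  -- zip(s, [""] + names, names[1:] + [""]); names[1:] is List.drop 1 (plain nonneg slice)
  let best := ((s.zip ("" :: names)).zip (names.drop 1 ++ [""])).foldl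
    (fun best t =>
      let l := max (lcp_len t.1.1.2.toList t.1.2.toList) (lcp_len t.1.1.2.toList t.2.toList)
      best.insert t.1.1.1
        (if MIN_LCP_LEN ≤ l then String.ofList (t.1.1.2.toList.take l) else t.1.1.2))
    (PySem.Dict.empty : PySem.Dict Int String)
  -- {tid: best[tid] for tid in topic_names}; best[tid] never raises: every tid was inserted
  -- (keys of the dict input are unique), so the total getD is exact here
  (topic_names.foldl (fun d p => d.insert p.1 (best.getD p.1 ""))
    (PySem.Dict.empty : PySem.Dict Int String)).items

-- ===== PRECONDITION & SPEC =====

-- The association list stands for a Python dict (topic_id -> topic_name), whose keys are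
-- necessarily distinct: Pre_ admits exactly the lists that encode a dict argument of A.
def Pre_build_topic_categories (topic_names : List (Int × String)) : Prop :=
  (topic_names.map Prod.fst).Nodup
instance (topic_names : List (Int × String)) : Decidable (Pre_build_topic_categories topic_names) := by
  unfold Pre_build_topic_categories; infer_instance

def pvWitness_build_topic_categories : (List (Int × String)) :=
  [(1, "abcd"), (2, "abce"), (3, "xy")]

def Spec_build_topic_categories (topic_names : List (Int × String)) (out : List (Int × String)) : Prop := out = build_topic_categories_alt topic_names
instance (topic_names : List (Int × String)) (out : List (Int × String)) : Decidable (Spec_build_topic_categories topic_names out) := by unfold Spec_build_topic_categories; infer_instance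

-- ===== CLAIM (what is proved, stated in full; the proofs are below) =====
def Claim_equal_build_topic_categories : Prop := ∀ (topic_names : List (Int × String)), Dom_build_topic_categories topic_names → Pre_build_topic_categories topic_names → Spec_build_topic_categories topic_names (build_topic_categories topic_names)

-- ===== LEMMAS AND PROOFS =====

theorem pv_idx_eq_len : ∀ (x y : List Char), longest_common_prefix_idx x y = lcp_len x y
  | c1 :: t1, c2 :: t2 => by
    simp only [longest_common_prefix_idx, lcp_len, pv_idx_eq_len t1 t2]
  | [], _ => by cases ‹List Char› <;> rfl
  | _ :: _, [] => rfl

theorem pv_lcp_le_left : ∀ (x y : List Char), lcp_len x y ≤ x.length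
  | c1 :: t1, c2 :: t2 => by
    simp only [lcp_len]
    split
    · exact Nat.succ_le_succ (pv_lcp_le_left t1 t2)
    · exact Nat.zero_le _
  | [], _ => by cases ‹List Char› <;> simp [lcp_len]
  | _ :: _, [] => by simp [lcp_len]

theorem pv_lcp_nil : ∀ (x : List Char), lcp_len x [] = 0
  | [] => rfl
  | _ :: _ => rfl

theorem le_cons_elim {a : Char} {x w : List Char} (h : a :: x ≤ w) :
    ∃ b y, w = b :: y ∧ (a < b ∨ (a = b ∧ x ≤ y)) := by
  rcases lt_or_eq_of_le h with hlt | rfl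
  · replace hlt : List.Lex (· < ·) (a :: x) w := hlt
    cases hlt with
    | rel hr => exact ⟨_, _, rfl, Or.inl hr⟩
    | cons ht => exact ⟨_, _, rfl, Or.inr ⟨rfl, le_of_lt ht⟩⟩
  · exact ⟨a, x, rfl, Or.inr ⟨rfl, le_rfl⟩⟩

theorem cons_le_cons_elim {a b : Char} {x y : List Char} (h : a :: x ≤ b :: y) :
    a < b ∨ (a = b ∧ x ≤ y) := by
  obtain ⟨b', y', he, hd⟩ := le_cons_elim h
  injection he with h1 h2; subst h1; subst h2; exact hd

-- LCP ultrametric, low side: x ≤ y ≤ z ⇒ the common prefix of z with x is no longer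
-- than the one with y.
theorem lcp_mono_low : ∀ (z x y : List Char), x ≤ y → y ≤ z → lcp_len z x ≤ lcp_len z y
  | [], x, y, _, _ => by cases x <;> cases y <;> simp [lcp_len]
  | c :: z', [], y, _, _ => Nat.zero_le _
  | c :: z', a :: x', y, hxy, hyz => by
    obtain ⟨b, y', rfl, hab⟩ := le_cons_elim hxy
    have hbc := cons_le_cons_elim hyz
    by_cases hac : a = c
    · subst hac
      obtain ⟨he, hy'⟩ : b = a ∧ y' ≤ z' := by
        rcases hab with h | ⟨he1, _⟩ <;> rcases hbc with h2 | ⟨he2, h3⟩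
        · exact absurd (h.trans h2) (lt_irrefl a)
        · exact absurd (lt_of_lt_of_eq h he2) (lt_irrefl a)
        · exact absurd (lt_of_eq_of_lt he1 h2) (lt_irrefl a)
        · exact ⟨he2, h3⟩
      have hx' : x' ≤ y' := by
        rcases hab with h | ⟨_, h⟩
        · exact absurd (lt_of_lt_of_eq h he) (lt_irrefl a)
        · exact h
      simp only [lcp_len]
      rw [if_pos he.symm]
      exact Nat.succ_le_succ (lcp_mono_low z' x' y' hx' hy')
    · simp [lcp_len, Ne.symm hac]

-- LCP ultrametric, high side: z ≤ y ≤ x ⇒ the common prefix of z with x is no longer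
-- than the one with y.
theorem lcp_mono_high : ∀ (z x y : List Char), z ≤ y → y ≤ x → lcp_len z x ≤ lcp_len z y
  | [], x, y, _, _ => by simp [lcp_len]
  | c :: z', x, y, hzy, hyx => by
    obtain ⟨b, y', rfl, hcb⟩ := le_cons_elim hzy
    obtain ⟨a, x', rfl, hba⟩ := le_cons_elim hyx
    by_cases hca : c = a
    · obtain ⟨he, hy'⟩ : b = c ∧ z' ≤ y' := by
        rcases hcb with h | ⟨he1, h3⟩ <;> rcases hba with h2 | ⟨he2, h4⟩
        · exact absurd (lt_of_lt_of_eq (h.trans h2) hca.symm) (lt_irrefl c)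
        · exact absurd (lt_of_lt_of_eq (lt_of_lt_of_eq h he2) hca.symm) (lt_irrefl c)
        · exact absurd (lt_of_lt_of_eq (lt_of_eq_of_lt he1 h2) hca.symm) (lt_irrefl c)
        · exact ⟨he1.symm, h3⟩
      have hx' : y' ≤ x' := by
        rcases hba with h2 | ⟨_, h4⟩
        · exact absurd (lt_of_lt_of_eq (lt_of_eq_of_lt he.symm h2) hca.symm) (lt_irrefl c)
        · exact h4
      simp only [lcp_len]
      rw [if_pos hca, if_pos he.symm]
      exact Nat.succ_le_succ (lcp_mono_high z' x' y' hy' hx')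
    · simp [lcp_len, hca]

-- running maximum of g over a list
def pvMax {α : Type} (g : α → Nat) (l : List α) : Nat :=
  l.foldl (fun m o => max m (g o)) 0

theorem pvMax_init {α : Type} (g : α → Nat) (l : List α) (a : Nat) :
    l.foldl (fun m o => max m (g o)) a = max a (pvMax g l) := by
  induction l generalizing a with
  | nil => simp [pvMax]
  | cons o t ih =>
    simp only [pvMax, List.foldl_cons] at *
    rw [ih, ih (max 0 (g o))]
    simp [Nat.max_assoc]

theorem pvMax_append {α : Type} (g : α → Nat) (l1 l2 : List α) :
    pvMax g (l1 ++ l2) = max (pvMax g l1) (pvMax g l2) := by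
  simp only [pvMax, List.foldl_append]
  rw [pvMax_init]
  rfl

theorem pvMax_cons {α : Type} (g : α → Nat) (o : α) (t : List α) :
    pvMax g (o :: t) = max (g o) (pvMax g t) := by
  simp only [pvMax, List.foldl_cons]
  rw [pvMax_init]
  simp [pvMax]

theorem pvMax_le {α : Type} (g : α → Nat) (l : List α) (B : Nat) (h : ∀ o ∈ l, g o ≤ B) :
    pvMax g l ≤ B := by
  induction l with
  | nil => simp [pvMax]
  | cons o t ih =>
    rw [pvMax_cons]
    exact max_le (h o List.mem_cons_self) (ih (fun x hx => h x (List.mem_cons_of_mem _ hx)))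

theorem le_pvMax {α : Type} (g : α → Nat) (l : List α) (o : α) (h : o ∈ l) :
    g o ≤ pvMax g l :=
  (PySem.List.le_foldl_max_nat l g 0).2 o h

theorem pvMax_perm {α : Type} (g : α → Nat) {l l' : List α} (h : l.Perm l') :
    pvMax g l = pvMax g l' := by
  exact h.foldl_eq (f := fun m o => max m (g o))
    (rcomm := ⟨fun a b c => by simp [Nat.max_comm, Nat.max_left_comm]⟩) 0

theorem pvMax_eq_last {α : Type} (g : α → Nat) (l : List α) (h : l ≠ [])
    (hm : ∀ o ∈ l, g o ≤ g (l.getLast h)) : pvMax g l = g (l.getLast h) :=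
  le_antisymm (pvMax_le g l _ hm) (le_pvMax g l _ (List.getLast_mem h))

theorem pvMax_eq_head {α : Type} (g : α → Nat) (l : List α) (h : l ≠ [])
    (hm : ∀ o ∈ l, g o ≤ g (l.head h)) : pvMax g l = g (l.head h) :=
  le_antisymm (pvMax_le g l _ hm) (le_pvMax g l _ (List.head_mem h))

-- the category A/B assign to name, given the best LCP length m
def pvCat (name : String) (m : Nat) : String :=
  if MIN_LCP_LEN ≤ m then String.ofList (name.toList.take m) else name

-- A's inner loop over the other entries, characterised by the running maximum
theorem pv_foldA (nm : String) (l : List (Int × String)) (m : Nat)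
    (hm : m ≤ nm.toList.length) :
    l.foldl
      (fun best_prefix q =>
        let lcp := longest_common_prefix nm q.2
        if MIN_LCP_LEN ≤ lcp.toList.length ∧ best_prefix.toList.length < lcp.toList.length
        then lcp else best_prefix)
      (if MIN_LCP_LEN ≤ m then String.ofList (nm.toList.take m) else "")
    = (if MIN_LCP_LEN ≤ l.foldl (fun m q => max m (lcp_len nm.toList q.2.toList)) m
       then String.ofList (nm.toList.take (l.foldl (fun m q => max m (lcp_len nm.toList q.2.toList)) m))
       else "") := by
  induction l generalizing m with
  | nil => rfl
  | cons q t ih =>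
    simp only [List.foldl_cons]
    have hk : (longest_common_prefix nm q.2).toList = nm.toList.take (lcp_len nm.toList q.2.toList) := by
      simp [longest_common_prefix, pv_idx_eq_len, String.toList_ofList]
    have hkle : lcp_len nm.toList q.2.toList ≤ nm.toList.length := pv_lcp_le_left _ _
    have hklen : (longest_common_prefix nm q.2).toList.length = lcp_len nm.toList q.2.toList := by
      rw [hk, List.length_take]; omega
    set k := lcp_len nm.toList q.2.toList with hkdef
    have hstep :
        (let lcp := longest_common_prefix nm q.2
         if MIN_LCP_LEN ≤ lcp.toList.length ∧
             (if MIN_LCP_LEN ≤ m then String.ofList (nm.toList.take m) else "").toList.length < lcp.toList.length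
         then lcp else (if MIN_LCP_LEN ≤ m then String.ofList (nm.toList.take m) else ""))
        = (if MIN_LCP_LEN ≤ max m k then String.ofList (nm.toList.take (max m k)) else "") := by
      have hstr : longest_common_prefix nm q.2 = String.ofList (nm.toList.take k) := by
        rw [hkdef]; simp [longest_common_prefix, pv_idx_eq_len]
      simp only [hklen]
      unfold MIN_LCP_LEN
      by_cases h3m : 3 ≤ m
      · rw [if_pos h3m]
        have hlen : (String.ofList (nm.toList.take m)).toList.length = m := by
          rw [String.toList_ofList, List.length_take]; omega
        rw [hlen]
        by_cases hc : 3 ≤ k ∧ m < k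
        · rw [if_pos hc, if_pos (by omega : 3 ≤ max m k), (by omega : max m k = k)]
          exact hstr
        · rw [if_neg hc, if_pos (by omega : 3 ≤ max m k), (by omega : max m k = m)]
      · rw [if_neg h3m]
        simp only [String.toList_empty, List.length_nil]
        by_cases hc : 3 ≤ k ∧ 0 < k
        · rw [if_pos hc, if_pos (by omega : 3 ≤ max m k), (by omega : max m k = k)]
          exact hstr
        · rw [if_neg hc, if_neg (by omega : ¬ 3 ≤ max m k)]
    rw [hstep]
    exact ih (max m k) (by omega)

-- A's per-entry value, as a function of the entry (the inner loop, made explicit)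
def pvVA (tn : List (Int × String)) (p : Int × String) : String :=
  let best_prefix := tn.foldl
    (fun best_prefix q =>
      if p.1 == q.1 then best_prefix
      else
        let lcp := longest_common_prefix p.2 q.2
        if MIN_LCP_LEN ≤ lcp.toList.length ∧ best_prefix.toList.length < lcp.toList.length
        then lcp else best_prefix)
    ""
  if best_prefix ≠ "" then best_prefix else p.2

-- B's zipped triples and per-triple value
def pvTrip (tn : List (Int × String)) : List (((Int × String) × String) × String) :=
  let s := PySem.List.sorted tn (fun kv => kv.2)
  let names := s.map (fun kv => kv.2)
  (s.zip ("" :: names)).zip (names.drop 1 ++ [""])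

def pvValB (t : ((Int × String) × String) × String) : String :=
  let l := max (lcp_len t.1.1.2.toList t.1.2.toList) (lcp_len t.1.1.2.toList t.2.toList)
  if MIN_LCP_LEN ≤ l then String.ofList (t.1.1.2.toList.take l) else t.1.1.2

def pvBest (tn : List (Int × String)) : PySem.Dict Int String :=
  (pvTrip tn).foldl (fun best t => best.insert t.1.1.1 (pvValB t)) PySem.Dict.empty

-- the other entries A compares p against, and the best LCP length among them
def pvOthers (tn : List (Int × String)) (p : Int × String) : List (Int × String) :=
  tn.filter (fun q => !(p.1 == q.1))

def pvM (tn : List (Int × String)) (p : Int × String) : Nat :=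
  pvMax (fun q => lcp_len p.2.toList q.2.toList) (pvOthers tn p)

-- a loop that skips on a condition is a loop over the filtered list
theorem pv_foldl_skip {σ α : Type} (c : α → Bool) (f : σ → α → σ) (l : List α) (init : σ) :
    l.foldl (fun acc x => if c x then acc else f acc x) init
      = (l.filter (fun x => !c x)).foldl f init := by
  rw [← PySem.List.foldl_if_eq_foldl_filter]
  apply PySem.List.foldl_congr_mem
  intro acc x _
  cases hc : c x <;> simp

-- with unique keys, filtering out p's key from u ++ p :: v removes exactly p
theorem pv_filter_nodup (u v : List (Int × String)) (p : Int × String)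
    (hnd : ((u ++ p :: v).map Prod.fst).Nodup) :
    (u ++ p :: v).filter (fun q => !(p.1 == q.1)) = u ++ v := by
  rw [List.map_append, List.map_cons, List.nodup_append] at hnd
  obtain ⟨hu, hpv, hdisj⟩ := hnd
  have hpu : ∀ q ∈ u, p.1 ≠ q.1 := by
    intro q hq he
    exact (hdisj q.1 (List.mem_map.mpr ⟨q, hq, rfl⟩) p.1 List.mem_cons_self) he.symm
  have hpvv : ∀ q ∈ v, p.1 ≠ q.1 := by
    intro q hq he
    have := (List.nodup_cons.mp hpv).1
    exact this (List.mem_map.mpr ⟨q, hq, he.symm⟩)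
  rw [List.filter_append, List.filter_cons]
  have h1 : u.filter (fun q => !(p.1 == q.1)) = u :=
    List.filter_eq_self.mpr (fun q hq => by simp [hpu q hq])
  have h2 : v.filter (fun q => !(p.1 == q.1)) = v :=
    List.filter_eq_self.mpr (fun q hq => by simp [hpvv q hq])
  simp [h1, h2]

-- A's per-entry value is pvCat of the best LCP length over the other entries
theorem pv_A_value (tn : List (Int × String)) (p : Int × String) :
    pvVA tn p = pvCat p.2 (pvM tn p) := by
  have hinner : tn.foldl
      (fun best_prefix q =>
        if p.1 == q.1 then best_prefix
        else
          let lcp := longest_common_prefix p.2 q.2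
          if MIN_LCP_LEN ≤ lcp.toList.length ∧ best_prefix.toList.length < lcp.toList.length
          then lcp else best_prefix) ""
      = (if MIN_LCP_LEN ≤ pvM tn p
         then String.ofList (p.2.toList.take (pvM tn p)) else "") := by
    rw [pv_foldl_skip (fun q => p.1 == q.1)
      (fun best_prefix q =>
        let lcp := longest_common_prefix p.2 q.2
        if MIN_LCP_LEN ≤ lcp.toList.length ∧ best_prefix.toList.length < lcp.toList.length
        then lcp else best_prefix) tn ""]
    exact pv_foldA p.2 (pvOthers tn p) 0 (Nat.zero_le _)
  show (fun best_prefix => if best_prefix ≠ "" then best_prefix else p.2)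
      (tn.foldl
        (fun best_prefix q =>
          if p.1 == q.1 then best_prefix
          else
            let lcp := longest_common_prefix p.2 q.2
            if MIN_LCP_LEN ≤ lcp.toList.length ∧ best_prefix.toList.length < lcp.toList.length
            then lcp else best_prefix) "")
      = pvCat p.2 (pvM tn p)
  rw [hinner]
  have hMle : pvM tn p ≤ p.2.toList.length :=
    pvMax_le _ _ _ (fun q _ => pv_lcp_le_left _ _)
  unfold pvCat
  by_cases h3 : MIN_LCP_LEN ≤ pvM tn p
  · rw [if_pos h3, if_pos h3]
    have hne : String.ofList (p.2.toList.take (pvM tn p)) ≠ "" := by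
      intro he
      have hcg := congrArg String.toList he
      rw [String.toList_ofList, String.toList_empty] at hcg
      have hl := congrArg List.length hcg
      rw [List.length_take, List.length_nil] at hl
      unfold MIN_LCP_LEN at h3
      omega
    simp [hne]
  · rw [if_neg h3, if_neg h3]
    simp

-- sorted order: every element is ≤ the last, and ≥ the head
theorem pv_pairwise_last : ∀ (l : List (Int × String)),
    l.Pairwise (fun a b => a.2 ≤ b.2) → ∀ (h : l ≠ []), ∀ q ∈ l, q.2 ≤ (l.getLast h).2
  | [], _, h, _, _ => absurd rfl h
  | [a], _, _, q, hq => by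
    simp only [List.mem_singleton] at hq
    subst hq; simp
  | a :: b :: t, hp, _, q, hq => by
    rw [List.getLast_cons (by simp)]
    rcases List.mem_cons.mp hq with rfl | hqt
    · exact (List.pairwise_cons.mp hp).1 _ (List.getLast_mem _)
    · exact pv_pairwise_last (b :: t) (List.pairwise_cons.mp hp).2 (by simp) q hqt

theorem pv_pairwise_head (l : List (Int × String))
    (hp : l.Pairwise (fun a b => a.2 ≤ b.2)) (h : l ≠ []) :
    ∀ q ∈ l, (l.head h).2 ≤ q.2 := by
  cases l with
  | nil => exact absurd rfl h
  | cons a t =>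
    intro q hq
    rcases List.mem_cons.mp hq with rfl | hqt
    · exact le_rfl
    · exact (List.pairwise_cons.mp hp).1 q hqt

theorem pv_cons_getElem {α : Type} (d : α) : ∀ (A : List α) (i : Nat) (hi : i = A.length),
    (d :: A)[i]'(by simp [hi]) = A.getLastD d
  | [], _, hi => by subst hi; rfl
  | a :: A', i, hi => by
    subst hi
    simp only [List.length_cons]
    rw [List.getElem_cons_succ, List.getLastD_cons]
    exact pv_cons_getElem a A' A'.length rfl

theorem pv_append_singleton_getElem_zero {α : Type} (d : α) : ∀ (B : List α),
    (B ++ [d])[0]'(by simp) = B.headD d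
  | [] => rfl
  | _ :: _ => rfl

theorem pv_getLastD_map (f : (Int × String) → String) :
    ∀ (l : List (Int × String)) (d : String) (h : l ≠ []),
      (l.map f).getLastD d = f (l.getLast h)
  | [a], _, _ => rfl
  | a :: b :: t, d, _ => by
    rw [List.map_cons, List.getLastD_cons, List.getLast_cons (by simp)]
    exact pv_getLastD_map f (b :: t) (f a) (by simp)

-- the neighbour maximum in sorted order IS the maximum over all other entries
theorem pv_core (xs ys : List (Int × String)) (p : Int × String)
    (hpw : (xs ++ p :: ys).Pairwise (fun a b => a.2 ≤ b.2)) :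
    max (lcp_len p.2.toList ((xs.map (fun kv => kv.2)).getLastD "").toList)
        (lcp_len p.2.toList ((ys.map (fun kv => kv.2)).headD "").toList)
      = pvMax (fun q => lcp_len p.2.toList q.2.toList) (xs ++ ys) := by
  rw [List.pairwise_append] at hpw
  obtain ⟨hxs, hpys, hcross⟩ := hpw
  obtain ⟨hple, hys⟩ := List.pairwise_cons.mp hpys
  rw [pvMax_append]
  congr 1
  · cases xs with
    | nil => simp [pvMax, pv_lcp_nil]
    | cons x0 xt =>
      have hne : (x0 :: xt : List (Int × String)) ≠ [] := by simp
      have hlast : (((x0 :: xt).map (fun kv => kv.2)).getLastD "")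
          = ((x0 :: xt).getLast hne).2 :=
        pv_getLastD_map _ _ _ hne
      rw [hlast]
      refine (pvMax_eq_last (fun q => lcp_len p.2.toList q.2.toList) _ hne ?_).symm
      intro q hq
      have h1 : q.2 ≤ ((x0 :: xt).getLast hne).2 := pv_pairwise_last _ hxs hne q hq
      have h2 : ((x0 :: xt).getLast hne).2 ≤ p.2 :=
        hcross _ (List.getLast_mem hne) p List.mem_cons_self
      exact lcp_mono_low p.2.toList q.2.toList ((x0 :: xt).getLast hne).2.toList
        (String.le_iff_toList_le.mp h1) (String.le_iff_toList_le.mp h2)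
  · cases ys with
    | nil => simp [pvMax, pv_lcp_nil]
    | cons y0 yt =>
      have hne : (y0 :: yt : List (Int × String)) ≠ [] := by simp
      have hhead : (((y0 :: yt).map (fun kv => kv.2)).headD "")
          = ((y0 :: yt).head hne).2 := rfl
      rw [hhead]
      refine (pvMax_eq_head (fun q => lcp_len p.2.toList q.2.toList) _ hne ?_).symm
      intro q hq
      have h1 : ((y0 :: yt).head hne).2 ≤ q.2 := pv_pairwise_head _ hys hne q hq
      have h2 : p.2 ≤ ((y0 :: yt).head hne).2 := hple _ (List.head_mem hne)
      exact lcp_mono_high p.2.toList q.2.toList ((y0 :: yt).head hne).2.toList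
        (String.le_iff_toList_le.mp h2) (String.le_iff_toList_le.mp h1)

-- the keys written by B's first loop are the sorted entries' keys, in order
theorem pv_trip_keys (tn : List (Int × String)) :
    (pvTrip tn).map (fun t => t.1.1.1)
      = (PySem.List.sorted tn (fun kv => kv.2)).map Prod.fst := by
  unfold pvTrip
  set s := PySem.List.sorted tn (fun kv => kv.2) with hs
  set names := s.map (fun kv => kv.2) with hn
  have hlen1 : (s.zip ("" :: names)).length ≤ (names.drop 1 ++ [""]).length := by
    simp only [List.length_zip, List.length_append, List.length_drop, List.length_cons,
      hn, List.length_map]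
    omega
  have h1 : ((s.zip ("" :: names)).zip (names.drop 1 ++ [""])).map Prod.fst
      = s.zip ("" :: names) := List.map_fst_zip hlen1
  have hlen2 : s.length ≤ ("" :: names).length := by
    simp only [List.length_cons, hn, List.length_map]
    omega
  have h2 : (s.zip ("" :: names)).map Prod.fst = s := List.map_fst_zip hlen2
  calc ((s.zip ("" :: names)).zip (names.drop 1 ++ [""])).map (fun t => t.1.1.1)
      = ((((s.zip ("" :: names)).zip (names.drop 1 ++ [""])).map Prod.fst).map Prod.fst).map Prod.fst := by
        rw [List.map_map, List.map_map]; rfl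
    _ = s.map Prod.fst := by rw [h1, h2]

-- B's dict lookup for p delivers pvCat of the best LCP length
theorem pv_B_value (tn : List (Int × String)) (p : Int × String) (hp : p ∈ tn)
    (hnd : (tn.map Prod.fst).Nodup) :
    (pvBest tn).getD p.1 "" = pvCat p.2 (pvM tn p) := by
  have hperm : (PySem.List.sorted tn (fun kv => kv.2)).Perm tn := PySem.List.sorted_perm ..
  have hpw : (PySem.List.sorted tn (fun kv => kv.2)).Pairwise (fun a b => a.2 ≤ b.2) :=
    PySem.List.sorted_pairwise ..
  have hp' : p ∈ PySem.List.sorted tn (fun kv => kv.2) := hperm.mem_iff.mpr hp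
  obtain ⟨xs, ys, hs⟩ := List.mem_iff_append.mp hp'
  have hsnd : ((PySem.List.sorted tn (fun kv => kv.2)).map Prod.fst).Nodup :=
    ((hperm.map Prod.fst).nodup_iff).mpr hnd
  have hkeys : ((pvTrip tn).map (fun t => t.1.1.1)).Nodup := by
    rw [pv_trip_keys]; exact hsnd
  have hitems : (pvBest tn).items = (pvTrip tn).map (fun t => (t.1.1.1, pvValB t)) := by
    unfold pvBest
    rw [PySem.Dict.items_foldl_insert_fresh (pvTrip tn) (fun t => t.1.1.1) pvValB
      PySem.Dict.empty (fun a _ => PySem.Dict.contains_empty _) hkeys]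
    rfl
  -- the triple B builds for p
  have hslen : (PySem.List.sorted tn (fun kv => kv.2)).length = xs.length + 1 + ys.length := by
    rw [hs]; simp; omega
  have htl : (pvTrip tn).length = (PySem.List.sorted tn (fun kv => kv.2)).length := by
    unfold pvTrip
    simp only [List.length_zip, List.length_append, List.length_drop, List.length_cons,
      List.length_map]
    omega
  have hi : xs.length < (pvTrip tn).length := by rw [htl, hslen]; omega
  have hnames : (PySem.List.sorted tn (fun kv => kv.2)).map (fun kv => kv.2)
      = (xs.map (fun kv => kv.2)) ++ p.2 :: (ys.map (fun kv => kv.2)) := by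
    rw [hs]; simp
  have htrip_i : (pvTrip tn)[xs.length]'hi
      = ((p, (xs.map (fun kv => kv.2)).getLastD ""), (ys.map (fun kv => kv.2)).headD "") := by
    unfold pvTrip
    rw [List.getElem_zip, List.getElem_zip]
    refine congrArg₂ Prod.mk (congrArg₂ Prod.mk ?_ ?_) ?_
    · rw [List.getElem_of_eq hs, List.getElem_append_right (Nat.le_refl xs.length)]
      simp
    · have he : ("" :: (PySem.List.sorted tn (fun kv => kv.2)).map (fun kv => kv.2))
          = ("" :: xs.map (fun kv => kv.2)) ++ (p.2 :: ys.map (fun kv => kv.2)) := by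
        rw [hnames]; rfl
      rw [List.getElem_of_eq he,
        List.getElem_append_left (by simp : xs.length < ("" :: xs.map (fun kv => kv.2)).length)]
      exact pv_cons_getElem "" (xs.map (fun kv => kv.2)) xs.length (by simp)
    · have he : ((PySem.List.sorted tn (fun kv => kv.2)).map (fun kv => kv.2)).drop 1 ++ [""]
          = (((xs.map (fun kv => kv.2)) ++ p.2 :: ((ys.map (fun kv => kv.2)) ++ [""])).drop 1) := by
        rw [hnames, ← List.drop_append_of_le_length
          (by simp only [List.length_append, List.length_map, List.length_cons]; omega)]
        simp
      rw [List.getElem_of_eq he, List.getElem_drop,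
        List.getElem_append_right (by rw [List.length_map]; omega :
          (xs.map (fun kv => kv.2)).length ≤ 1 + xs.length)]
      have hidx : 1 + xs.length - (List.map (fun kv => kv.2) xs).length = 1 := by
        rw [List.length_map]; omega
      simp only [hidx, List.getElem_cons_succ]
      exact pv_append_singleton_getElem_zero "" (ys.map (fun kv => kv.2))
  have hmem : (p.1, pvValB ((p, (xs.map (fun kv => kv.2)).getLastD ""),
      (ys.map (fun kv => kv.2)).headD "")) ∈ (pvBest tn).items := by
    rw [hitems]
    have hm := List.mem_map_of_mem (f := fun t => (t.1.1.1, pvValB t)) (List.getElem_mem hi)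
    rw [htrip_i] at hm
    exact hm
  have hkeysnd : (pvBest tn).keys.Nodup := by
    rw [PySem.Dict.keys, hitems, List.map_map]
    exact hkeys
  rw [PySem.Dict.getD_of_mem_items _ hmem hkeysnd ""]
  -- the looked-up value is pvCat of the neighbour max, which is the global max
  have hval : pvValB ((p, (xs.map (fun kv => kv.2)).getLastD ""),
      (ys.map (fun kv => kv.2)).headD "")
      = pvCat p.2 (max (lcp_len p.2.toList ((xs.map (fun kv => kv.2)).getLastD "").toList)
          (lcp_len p.2.toList ((ys.map (fun kv => kv.2)).headD "").toList)) := rfl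
  rw [hval, pv_core xs ys p (hs ▸ hpw)]
  obtain ⟨u, v, htn⟩ := List.mem_iff_append.mp hp
  have hfil : pvOthers tn p = u ++ v := by
    unfold pvOthers; rw [htn]; exact pv_filter_nodup u v p (htn ▸ hnd)
  have hperm2 : (xs ++ ys).Perm (u ++ v) := by
    have h1 : (xs ++ p :: ys).Perm (u ++ p :: v) := by rw [← hs, ← htn]; exact hperm
    have h2 : (p :: (xs ++ ys)).Perm (p :: (u ++ v)) :=
      ((List.perm_middle).symm.trans h1).trans List.perm_middle
    exact h2.cons_inv
  have hM : pvM tn p = pvMax (fun q => lcp_len p.2.toList q.2.toList) (xs ++ ys) := by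
    unfold pvM
    rw [hfil]
    exact (pvMax_perm _ hperm2).symm
  rw [hM]

-- A = B pointwise
theorem pv_main (topic_names : List (Int × String))
    (hnd : (topic_names.map Prod.fst).Nodup) :
    build_topic_categories topic_names = build_topic_categories_alt topic_names := by
  have hA : build_topic_categories topic_names
      = topic_names.map (fun p => (p.1, pvVA topic_names p)) := by
    show (topic_names.foldl (fun categories p => categories.insert p.1 (pvVA topic_names p))
        (PySem.Dict.empty : PySem.Dict Int String)).items = _
    rw [PySem.Dict.items_foldl_insert_fresh topic_names Prod.fst
      (fun p => pvVA topic_names p) PySem.Dict.empty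
      (fun a _ => PySem.Dict.contains_empty _) hnd]
    rfl
  have hB : build_topic_categories_alt topic_names
      = topic_names.map (fun p => (p.1, (pvBest topic_names).getD p.1 "")) := by
    show (topic_names.foldl (fun d p => d.insert p.1 ((pvBest topic_names).getD p.1 ""))
        (PySem.Dict.empty : PySem.Dict Int String)).items = _
    rw [PySem.Dict.items_foldl_insert_fresh topic_names Prod.fst
      (fun p => (pvBest topic_names).getD p.1 "") PySem.Dict.empty
      (fun a _ => PySem.Dict.contains_empty _) hnd]
    rfl
  rw [hA, hB]
  apply List.map_congr_left
  intro p hp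
  rw [pv_A_value topic_names p, pv_B_value topic_names p hp hnd]

-- ===== VERDICT (by name: the statement is the Claim_ definition above) =====
theorem build_topic_categories_spec : Claim_equal_build_topic_categories := by
  intro tn _ hpre
  unfold Spec_build_topic_categories
  exact pv_main tn hpre
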